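-- pv_equiv track=rewrite | github.com/UTurtle/function_based_for_tango | function_based/function_based_noise_generator.py | distribute_files
-- ===== SOURCE A (Python) =====
-- def distribute_files(total_files, max_level):
--     """
--     전체 파일(total_files)을 레벨 1부터 max_level까지 균등 분배한다.
--     나누어떨어지지 않을 경우, 나머지(remainder)를 각 레벨에 하나씩
--     추가해준다.
--     """
--     per_level = total_files // max_level
--     remainder = total_files % max_level
--
--     counts = {level: per_level for level in range(1, max_level + 1)}
--
--     for level in range(1, max_level + 1):
--         if remainder:
--             counts[level] += 1
--             remainder -= 1
--     return counts
-- ===== SOURCE B (Python) =====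
-- def distribute_files(total_files, max_level):
--     """Greedy pool-draining distribution: each level takes the ceiling of the
--     files still remaining divided by the levels still left, and the pool
--     shrinks accordingly; no precomputed quotient/remainder is needed."""
--     counts = {}
--     remaining = total_files
--     for level in range(1, max_level + 1):
--         share = -((-remaining) // (max_level - level + 1))
--         counts[level] = share
--         remaining -= share
--     return counts
-- ===== Notes on version B (the rewrite author's own statement) =====
-- stated objective: alternative
-- what changed: B drops A's precomputed quotient/remainder and redistribution pass entirely: it drains a pool, giving each level the ceiling of the files still remaining over the levels still left, carrying the remaining total as the only loop state.
import Mathlib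
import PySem

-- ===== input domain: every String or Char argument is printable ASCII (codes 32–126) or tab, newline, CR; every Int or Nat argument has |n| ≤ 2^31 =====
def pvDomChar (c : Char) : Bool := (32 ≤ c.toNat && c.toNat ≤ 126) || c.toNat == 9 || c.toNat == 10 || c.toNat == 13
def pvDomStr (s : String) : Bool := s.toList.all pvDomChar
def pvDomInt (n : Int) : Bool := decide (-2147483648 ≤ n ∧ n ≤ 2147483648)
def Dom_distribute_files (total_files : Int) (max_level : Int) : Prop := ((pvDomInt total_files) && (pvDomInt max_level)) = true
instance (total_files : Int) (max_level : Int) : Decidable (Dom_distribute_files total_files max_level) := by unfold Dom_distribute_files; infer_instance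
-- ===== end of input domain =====

-- B replaces A's quotient/remainder-then-redistribute scheme by a greedy pool-draining
-- loop: each level takes the ceiling of the remaining files over the remaining levels;
-- objective: alternative (same cost, different algorithm).

-- ===== PORT A =====
def distribute_files (total_files : Int) (max_level : Int) : List (Int × Int) :=
  let per_level := PySem.Int.floordiv total_files max_level
  let remainder := PySem.Int.mod total_files max_level
  let counts : PySem.Dict Int Int :=
    (PySem.List.pyRange 1 (max_level + 1) 1).foldl
      (fun d level => d.insert level per_level) PySem.Dict.empty
  let st := (PySem.List.pyRange 1 (max_level + 1) 1).foldl
    (fun (st : PySem.Dict Int Int × Int) level =>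
      if st.2 ≠ 0 then (st.1.modify level 0 (· + 1), st.2 - 1) else st)
    (counts, remainder)
  st.1.items

-- ===== PORT B =====
def distribute_files_alt (total_files : Int) (max_level : Int) : List (Int × Int) :=
  let st := (PySem.List.pyRange 1 (max_level + 1) 1).foldl
    (fun (st : PySem.Dict Int Int × Int) level =>
      let share := -(PySem.Int.floordiv (-st.2) (max_level - level + 1))
      (st.1.insert level share, st.2 - share))
    (PySem.Dict.empty, total_files)
  st.1.items

-- ===== PRECONDITION & SPEC =====
-- Pre_ excludes max_level = 0, where Python A raises ZeroDivisionError.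
def Pre_distribute_files (total_files : Int) (max_level : Int) : Prop := max_level ≠ 0
instance (total_files : Int) (max_level : Int) : Decidable (Pre_distribute_files total_files max_level) := by unfold Pre_distribute_files; infer_instance
def pvWitness_distribute_files : Int × Int := (7, 3)

def Spec_distribute_files (total_files : Int) (max_level : Int) (out : List (Int × Int)) : Prop := out = distribute_files_alt total_files max_level
instance (total_files : Int) (max_level : Int) (out : List (Int × Int)) : Decidable (Spec_distribute_files total_files max_level out) := by unfold Spec_distribute_files; infer_instance

-- ===== CLAIM (what is proved, stated in full; the proofs are below) =====
def Claim_equal_distribute_files : Prop := ∀ (total_files : Int) (max_level : Int), Dom_distribute_files total_files max_level → Pre_distribute_files total_files max_level → Spec_distribute_files total_files max_level (distribute_files total_files max_level)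

-- ===== LEMMAS AND PROOFS =====

-- Once the counter hits 0, A's redistribution loop is the identity.
theorem foldl_step_zero (ks : List Int) (d : PySem.Dict Int Int) :
    ks.foldl (fun (st : PySem.Dict Int Int × Int) level =>
      if st.2 ≠ 0 then (st.1.modify level 0 (· + 1), st.2 - 1) else st) (d, 0) = (d, 0) := by
  induction ks with
  | nil => rfl
  | cons l ks ih =>
    rw [List.foldl_cons, if_neg (by simp)]
    exact ih

-- A's redistribution loop = modify the first r keys (for 0 ≤ r).
theorem foldl_step_eq_take (ks : List Int) (d : PySem.Dict Int Int) (r : Int) (hr : 0 ≤ r) :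
    (ks.foldl (fun (st : PySem.Dict Int Int × Int) level =>
      if st.2 ≠ 0 then (st.1.modify level 0 (· + 1), st.2 - 1) else st) (d, r)).1
    = (ks.take r.toNat).foldl (fun d' l => d'.modify l 0 (· + 1)) d := by
  induction ks generalizing d r with
  | nil => simp
  | cons l ks ih =>
    by_cases h : r = 0
    · subst h
      rw [List.foldl_cons, if_neg (by simp), foldl_step_zero]
      simp
    · have h1 : r.toNat = (r - 1).toNat + 1 := by omega
      simp only [List.foldl_cons, if_pos h, h1, List.take_succ_cons, List.foldl_cons]
      exact ih _ (r - 1) (by omega)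

-- The ceiling share at level l of B's greedy loop equals A's pattern value.
theorem greedy_share (M per rem l : Int) (hl : 1 ≤ l) (hlM : l ≤ M)
    (hrem : 0 ≤ rem) (hremM : rem < M) :
    -(PySem.Int.floordiv (-(per * (M - l + 1) + max (rem - l + 1) 0)) (M - l + 1))
      = if l ≤ rem then per + 1 else per := by
  set n := M - l + 1 with hn
  have hnpos : 0 < n := by omega
  by_cases hle : l ≤ rem
  · rw [if_pos hle, PySem.Int.neg_floordiv_neg_eq_iff_of_pos hnpos]
    have hmax : max (rem - l + 1) 0 = rem - l + 1 := by omega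
    constructor
    · nlinarith [hmax]
    · nlinarith [hmax]
  · rw [if_neg hle, PySem.Int.neg_floordiv_neg_eq_iff_of_pos hnpos]
    have hmax : max (rem - l + 1) 0 = 0 := by omega
    constructor
    · nlinarith [hmax]
    · nlinarith [hmax]

-- B's stateful greedy loop computes the same inserts as the direct pattern loop.
theorem greedy_loop (M per rem : Int) (hrem : 0 ≤ rem) (hremM : rem < M) :
    ∀ (n : Nat) (l : Int), 1 ≤ l → (M + 1 - l).toNat = n →
    ∀ (d : PySem.Dict Int Int),
    ((PySem.List.pyRange l (M + 1) 1).foldl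
      (fun (st : PySem.Dict Int Int × Int) level =>
        let share := -(PySem.Int.floordiv (-st.2) (M - level + 1))
        (st.1.insert level share, st.2 - share))
      (d, per * (M - l + 1) + max (rem - l + 1) 0)).1
    = (PySem.List.pyRange l (M + 1) 1).foldl
        (fun d' v => d'.insert v (if v ≤ rem then per + 1 else per)) d := by
  intro n
  induction n with
  | zero =>
    intro l hl hn d
    rw [PySem.List.pyRange_one_eq_nil (by omega)]
    rfl
  | succ k ih =>
    intro l hl hn d
    rw [PySem.List.pyRange_one_cons (by omega)]
    simp only [List.foldl_cons]
    rw [greedy_share M per rem l hl (by omega) hrem hremM]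
    have hrm : per * (M - l + 1) + max (rem - l + 1) 0 - (if l ≤ rem then per + 1 else per)
        = per * (M - (l + 1) + 1) + max (rem - (l + 1) + 1) 0 := by
      have h1 : per * (M - l + 1) = per * (M - (l + 1) + 1) + per := by ring
      by_cases hle : l ≤ rem <;> simp [hle] <;> omega
    rw [hrm]
    exact ih (l + 1) (by omega) (by omega) _

theorem distribute_files_spec_aux (total_files : Int) (max_level : Int)
    (hm : max_level ≠ 0) :
    distribute_files total_files max_level = distribute_files_alt total_files max_level := by
  unfold distribute_files distribute_files_alt
  set per := PySem.Int.floordiv total_files max_level with hper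
  set rem := PySem.Int.mod total_files max_level with hrem
  simp only []
  by_cases hpos : 0 < max_level
  · -- range nonempty case
    have hrb : 0 ≤ rem ∧ rem < max_level := by
      rw [hrem, PySem.Int.mod_eq_emod_of_pos hpos]
      exact ⟨Int.emod_nonneg _ (by omega), Int.emod_lt_of_pos _ hpos⟩
    set ks := PySem.List.pyRange 1 (max_level + 1) 1 with hks
    have hnd : ks.Nodup := PySem.List.nodup_pyRange_one 1 (max_level + 1)
    -- A's first loop: fresh distinct inserts into empty append in order
    have hcounts : ((ks.foldl (fun d level => d.insert level per) PySem.Dict.empty)).items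
        = ks.map (fun l => (l, per)) := by
      have := PySem.Dict.items_foldl_insert_fresh (l := ks) (k := id) (v := fun _ => per)
        (d := PySem.Dict.empty) (by simp) (by simpa using hnd)
      simpa using this
    set counts := ks.foldl (fun d level => d.insert level per) PySem.Dict.empty with hc
    have hckeys : counts.keys = ks := by
      simp [PySem.Dict.keys, hcounts, Function.comp_def]
    -- A's second loop via foldl_step_eq_take
    rw [foldl_step_eq_take ks counts rem hrb.1]
    -- the taken prefix is pyRange 1 (rem+1) 1
    have hsplit : ks = PySem.List.pyRange 1 (rem + 1) 1 ++ PySem.List.pyRange (rem + 1) (max_level + 1) 1 :=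
      PySem.List.pyRange_one_append 1 (rem + 1) (max_level + 1) (by omega) (by omega)
    have hlen : (PySem.List.pyRange 1 (rem + 1) 1).length = rem.toNat := by
      rw [PySem.List.length_pyRange_one]; omega
    have htake : ks.take rem.toNat = PySem.List.pyRange 1 (rem + 1) 1 := by
      rw [hsplit, ← hlen, List.take_left]
    rw [htake]
    set d' := (PySem.List.pyRange 1 (rem + 1) 1).foldl (fun d' l => d'.modify l 0 (· + 1)) counts with hd'
    -- keys are unchanged by the modify loop (all keys already present)
    have hkeys : d'.keys = ks := by
      rw [hd', PySem.Dict.keys_foldl_modify, hckeys]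
      have hsub : ∀ x ∈ PySem.List.pyRange 1 (rem + 1) 1, x ∈ ks := by
        intro x hx
        rw [PySem.List.mem_pyRange_one] at hx ⊢
        omega
      rw [PySem.Set.update_eq_append_filter]
      have : (PySem.Set.ofList (PySem.List.pyRange 1 (rem + 1) 1)).filter
          (fun y => !(PySem.Set.contains ks y)) = [] := by
        rw [List.filter_eq_nil_iff]
        intro y hy
        have hyk : y ∈ ks := hsub y ((PySem.Set.mem_ofList _ _).1 hy)
        simp [hyk]
      rw [this, List.append_nil]
    have hndk : d'.keys.Nodup := hkeys ▸ hnd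
    -- values of d'
    have hval : ∀ v ∈ ks, d'.getD v 0 = if v ≤ rem then per + 1 else per := by
      intro v hv
      rw [hd', PySem.Dict.getD_foldl_modify_add_one]
      have hcv : counts.getD v 0 = per :=
        PySem.Dict.getD_of_mem_items _ (by rw [hcounts]; exact List.mem_map_of_mem hv)
          (by rw [hckeys]; exact hnd) 0
      rw [hcv]
      rw [PySem.List.mem_pyRange_one] at hv
      by_cases hle : v ≤ rem
      · have hmem : v ∈ PySem.List.pyRange 1 (rem + 1) 1 := by
          rw [PySem.List.mem_pyRange_one]; omega
        rw [List.count_eq_one_of_mem (PySem.List.nodup_pyRange_one _ _) hmem]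
        simp [hle]
      · have hmem : v ∉ PySem.List.pyRange 1 (rem + 1) 1 := by
          rw [PySem.List.mem_pyRange_one]; omega
        rw [List.count_eq_zero_of_not_mem hmem]
        simp [hle]
    -- B's greedy loop: rewrite its start state and apply greedy_loop
    have hstart : total_files = per * (max_level - 1 + 1) + max (rem - 1 + 1) 0 := by
      have := PySem.Int.floordiv_mul_add_mod total_files max_level
      rw [← hper, ← hrem] at this
      have hmax : max (rem - 1 + 1) 0 = rem := by omega
      rw [hmax]; linarith [this]
    have halt : ((ks.foldl
        (fun (st : PySem.Dict Int Int × Int) level =>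
          let share := -(PySem.Int.floordiv (-st.2) (max_level - level + 1))
          (st.1.insert level share, st.2 - share))
        (PySem.Dict.empty, total_files)).1).items
        = ks.map (fun l => (l, if l ≤ rem then per + 1 else per)) := by
      rw [hstart, hks,
        greedy_loop max_level per rem hrb.1 hrb.2 (max_level + 1 - 1).toNat 1 (by omega) rfl]
      have := PySem.Dict.items_foldl_insert_fresh (l := ks) (k := id)
        (v := fun l => if l ≤ rem then per + 1 else per)
        (d := PySem.Dict.empty) (by simp) (by simpa using hnd)
      simpa [hks] using this
    rw [halt, PySem.Dict.items_eq_map_keys d' hndk 0, hkeys]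
    exact List.map_congr_left (fun v hv => by rw [hval v hv])
  · -- max_level < 0 : the range is empty, both sides are []
    have hnil : PySem.List.pyRange 1 (max_level + 1) 1 = [] :=
      PySem.List.pyRange_one_eq_nil (by omega)
    simp [hnil, PySem.Dict.empty]

-- ===== VERDICT (by name: the statement is the Claim_ definition above) =====
theorem distribute_files_spec : Claim_equal_distribute_files := by
  intro total_files max_level _ hpre
  exact distribute_files_spec_aux total_files max_level hpre
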